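-- pv_equiv track=rewrite | github.com/SKN19-Final-1team/backend | app/rag/router.py | _fallback_contains
-- ===== SOURCE A (Python) =====
-- from typing import Dict, List, Optional, Tuple
--
-- def _fallback_contains(synonyms: Dict[str, List[str]], text: str) -> List[str]:
--     hits = []
--     compact_text = text.replace(" ", "")
--     for canonical, terms in synonyms.items():
--         for term in [canonical, *terms]:
--             if not term:
--                 continue
--             lowered = term.lower()
--             if lowered in text or lowered.replace(" ", "") in compact_text:
--                 hits.append(canonical)
--                 break
--     return hits
-- ===== SOURCE B (Python) =====
-- def _fallback_contains(synonyms, text):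
--     # Staged: normalize all terms once, index every short substring of the
--     # compacted text in a set, then answer each term by one set lookup.
--     # (A verbatim occurrence survives space removal, so the compacted test
--     # subsumes A's `lowered in text` check.)
--     compact = text.replace(" ", "")
--     needed = [(canonical,
--                [t.lower().replace(" ", "") for t in [canonical, *terms] if t])
--               for canonical, terms in synonyms.items()]
--     max_len = max((len(t) for _, ts in needed for t in ts), default=0)
--     subs = {compact[i:i + l]
--             for i in range(len(compact) + 1)
--             for l in range(max_len + 1)}
--     return [canonical for canonical, ts in needed if any(t in subs for t in ts)]
-- ===== Notes on version B (the rewrite author's own statement) =====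
-- stated objective: faster
-- what changed: B replaces A's per-term substring scan over the text with a staged algorithm: it normalizes all terms once, builds a hash-set indexing every substring of the compacted text up to the maximum term length, then decides each term by one O(1) set lookup instead of rescanning the text (A's verbatim 'lowered in text' test is dropped as subsumed: a verbatim occurrence survives space removal).
import Mathlib
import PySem

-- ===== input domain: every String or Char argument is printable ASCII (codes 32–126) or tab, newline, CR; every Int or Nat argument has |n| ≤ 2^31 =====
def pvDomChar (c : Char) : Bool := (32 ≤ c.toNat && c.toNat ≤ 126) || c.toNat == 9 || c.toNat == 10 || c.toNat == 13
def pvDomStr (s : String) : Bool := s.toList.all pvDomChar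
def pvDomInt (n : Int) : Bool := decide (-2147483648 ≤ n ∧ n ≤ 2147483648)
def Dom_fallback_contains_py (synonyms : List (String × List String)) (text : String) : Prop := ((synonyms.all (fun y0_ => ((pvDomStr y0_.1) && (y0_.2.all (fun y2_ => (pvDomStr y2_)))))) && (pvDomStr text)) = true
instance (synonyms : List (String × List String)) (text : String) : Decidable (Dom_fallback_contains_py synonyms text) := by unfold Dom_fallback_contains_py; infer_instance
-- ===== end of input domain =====

-- B: faster staged algorithm — normalize all terms once, build a set
-- indexing every substring (up to the maximum term length) of the compacted text once, and
-- answers each term by a single set lookup instead of A's per-term substring scan.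

-- ===== PORT A =====
-- inner `for term in [canonical, *terms]` loop with its `continue`/`break`
def pvAInner (text compact_text : String) : List String → Bool
  | [] => false
  | term :: rest =>
      if term = "" then pvAInner text compact_text rest
      else
        let lowered := PySem.Str.lower term
        if PySem.Str.isIn lowered text
            || PySem.Str.isIn (PySem.Str.replace lowered " " "") compact_text then true
        else pvAInner text compact_text rest

def fallback_contains_py (synonyms : List (String × List String)) (text : String) : List String :=
  let compact_text := PySem.Str.replace text " " ""
  synonyms.foldl
    (fun hits p => if pvAInner text compact_text (p.1 :: p.2) then hits ++ [p.1] else hits) []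

-- ===== PORT B =====
-- `t.lower().replace(" ", "")`
def pvStripLower (t : String) : String := PySem.Str.replace (PySem.Str.lower t) " " ""

-- the set comprehension `{compact[i:i+l] for i in range(len(compact)+1) for l in range(max_len+1)}` (as its element list)
def pvSubsList (compact : String) (maxLen : Int) : List String :=
  (PySem.List.pyRange 0 (PySem.Str.len compact + 1) 1).flatMap (fun i =>
    (PySem.List.pyRange 0 (maxLen + 1) 1).map (fun l =>
      PySem.Str.slice compact (some i) (some (i + l))))

def fallback_contains_py_alt (synonyms : List (String × List String)) (text : String) : List String :=
  let compact := PySem.Str.replace text " " ""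
  let needed := synonyms.map (fun p =>
    (p.1, ((p.1 :: p.2).filter (fun t => t != "")).map pvStripLower))
  let maxLen := PySem.List.maxD ((needed.flatMap Prod.snd).map PySem.Str.len) (fun x => x) 0
  let subs : PySem.Set String := PySem.Set.ofList (pvSubsList compact maxLen)
  (needed.filter (fun p => p.2.any (fun t => PySem.Set.contains subs t))).map Prod.fst

-- ===== PRECONDITION & SPEC =====
def Spec_fallback_contains_py (synonyms : List (String × List String)) (text : String) (out : List String) : Prop := out = fallback_contains_py_alt synonyms text
instance (synonyms : List (String × List String)) (text : String) (out : List String) : Decidable (Spec_fallback_contains_py synonyms text out) := by unfold Spec_fallback_contains_py; infer_instance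

-- ===== CLAIM (what is proved, stated in full; the proofs are below) =====
def Claim_equal_fallback_contains_py : Prop := ∀ (synonyms : List (String × List String)) (text : String), Dom_fallback_contains_py synonyms text → Spec_fallback_contains_py synonyms text (fallback_contains_py synonyms text)

-- ===== LEMMAS AND PROOFS =====

-- `s.replace(" ", "")` is a filter
theorem pv_go_filter (fuel : Nat) : ∀ (l acc : List Char), l.length ≤ fuel →
    PySem.Chars.replace.go [' '] [] fuel l acc = acc.reverse ++ l.filter (· ≠ ' ') := by
  induction fuel with
  | zero =>
      intro l acc h
      have : l = [] := List.eq_nil_of_length_eq_zero (Nat.le_zero.mp h)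
      subst this; simp [PySem.Chars.replace.go]
  | succ n ih =>
      intro l acc h
      cases l with
      | nil => simp [PySem.Chars.replace.go]
      | cons c t =>
          simp only [PySem.Chars.replace.go]
          split_ifs with hp
          · have hc : c = ' ' := by
              have := hp
              simp only [List.isPrefixOf, Bool.and_true] at this
              exact (beq_iff_eq.mp this).symm
            subst hc
            rw [show List.drop [' '].length (' ' :: t) = t from rfl,
              ih t _ (Nat.le_of_succ_le_succ (by simpa using h))]
            simp
          · have hc : c ≠ ' ' := by
              intro e; exact hp (by simp [e, List.isPrefixOf])
            rw [ih t _ (Nat.le_of_succ_le_succ (by simpa using h))]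
            simp [hc]

theorem pv_replace_space (s : List Char) :
    PySem.Chars.replace s [' '] [] = s.filter (· ≠ ' ') := by
  simp only [PySem.Chars.replace, List.isEmpty, reduceCtorEq, if_false]
  exact pv_go_filter s.length s [] le_rfl

theorem pv_replace_space_str (s : String) :
    (PySem.Str.replace s " " "").toList = s.toList.filter (· ≠ ' ') := by
  rw [PySem.Str.toList_replace, show (" " : String).toList = [' '] from rfl,
    show ("" : String).toList = [] from rfl, pv_replace_space]

-- an occurrence survives deleting spaces on both sides
theorem pv_infix_filter {sub s : List Char} (h : sub <:+: s) :
    sub.filter (· ≠ ' ') <:+: s.filter (· ≠ ' ') := by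
  obtain ⟨p, q, rfl⟩ := h
  exact ⟨p.filter (· ≠ ' '), q.filter (· ≠ ' '), by simp [List.filter_append]⟩

-- the verbatim test is subsumed by the compacted one
theorem pv_cond_eq (lowered text : List Char) :
    (PySem.Chars.isIn lowered text
      || PySem.Chars.isIn (lowered.filter (· ≠ ' ')) (text.filter (· ≠ ' '))) =
    PySem.Chars.isIn (lowered.filter (· ≠ ' ')) (text.filter (· ≠ ' ')) := by
  cases h : PySem.Chars.isIn lowered text with
  | false => simp
  | true =>
      have h2 : PySem.Chars.isIn (lowered.filter (· ≠ ' ')) (text.filter (· ≠ ' ')) = true :=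
        (PySem.Chars.isIn_iff_infix _ _).mpr
          (pv_infix_filter ((PySem.Chars.isIn_iff_infix _ _).mp h))
      rw [h2]; rfl

-- A's inner break-loop is an `any` of the compacted test over the nonempty terms
theorem pv_inner_eq_any (text : String) (l : List String) :
    pvAInner text (PySem.Str.replace text " " "") l
      = l.any (fun t => t != ""
          && PySem.Str.isIn (pvStripLower t) (PySem.Str.replace text " " "")) := by
  induction l with
  | nil => rfl
  | cons t rest ih =>
      by_cases ht : t = ""
      · subst ht
        simp [pvAInner, ih]
      · have hunfold : pvAInner text (PySem.Str.replace text " " "") (t :: rest)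
            = ((PySem.Str.isIn (PySem.Str.lower t) text
                || PySem.Str.isIn (PySem.Str.replace (PySem.Str.lower t) " " "")
                    (PySem.Str.replace text " " ""))
              || pvAInner text (PySem.Str.replace text " " "") rest) := by
          simp only [pvAInner, if_neg ht]
          cases hcond : (PySem.Str.isIn (PySem.Str.lower t) text
              || PySem.Str.isIn (PySem.Str.replace (PySem.Str.lower t) " " "")
                  (PySem.Str.replace text " " "")) <;> simp
        have hb : (PySem.Str.isIn (PySem.Str.lower t) text
            || PySem.Str.isIn (PySem.Str.replace (PySem.Str.lower t) " " "")
                (PySem.Str.replace text " " ""))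
            = PySem.Str.isIn (pvStripLower t) (PySem.Str.replace text " " "") := by
          simp only [pvStripLower, PySem.Str.isIn_eq, pv_replace_space_str, PySem.Str.toList_lower]
          exact pv_cond_eq _ _
        rw [hunfold, hb, ih]
        have ht' : (t != "") = true := by simp [ht]
        simp only [List.any_cons, ht', Bool.true_and]

-- `max(..., default=0)` over nonnegative values: nonnegative and an upper bound
theorem pv_maxD_bound (xs : List Int) (hpos : ∀ x ∈ xs, 0 ≤ x) :
    0 ≤ PySem.List.maxD xs (fun x => x) 0 ∧ ∀ x ∈ xs, x ≤ PySem.List.maxD xs (fun x => x) 0 := by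
  cases h : PySem.List.max? xs (fun x => x) with
  | none =>
      have : xs = [] := (PySem.List.max?_eq_none_iff xs _).mp h
      subst this
      simp [PySem.List.maxD, h]
  | some m =>
      have hmem := PySem.List.max?_mem h
      have hmax := PySem.List.max?_isMax h
      refine ⟨?_, ?_⟩ <;> simp only [PySem.List.maxD, h, Option.getD_some]
      · exact hpos m hmem
      · exact hmax

-- membership in the substring index = Python's `in` on the compacted text (for terms within the length bound)
theorem pv_mem_subs (compact s : String) (L : Int)
    (hs0 : (0 : Int) ≤ (s.toList.length : Int)) (hsL : (s.toList.length : Int) ≤ L) :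
    s ∈ pvSubsList compact L ↔ PySem.Str.isIn s compact = true := by
  rw [PySem.Str.isIn_iff_infix]
  unfold pvSubsList
  simp only [List.mem_flatMap, List.mem_map]
  constructor
  · rintro ⟨i, hi, l, hl, rfl⟩
    rw [PySem.List.mem_pyRange_one] at hi hl
    obtain ⟨a, rfl⟩ : ∃ a : Nat, i = (a : Int) := ⟨i.toNat, by omega⟩
    obtain ⟨b, rfl⟩ : ∃ b : Nat, l = (b : Int) := ⟨l.toNat, by omega⟩
    rw [PySem.Str.toList_slice,
      show (a : Int) + (b : Int) = ((a + b : Nat) : Int) by push_cast; ring]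
    unfold PySem.Chars.slice
    rw [PySem.List.slice_natCast]
    have h1 : List.take (a + b - a) (List.drop a compact.toList)
        <+: List.drop a compact.toList := List.take_prefix _ _
    exact List.infix_iff_prefix_suffix.mpr ⟨_, h1, List.drop_suffix _ _⟩
  · rintro ⟨p, q, hpq⟩
    refine ⟨(p.length : Int), ?_, (s.toList.length : Int), ?_, ?_⟩
    · rw [PySem.List.mem_pyRange_one]
      have : p.length ≤ compact.toList.length := by
        rw [← hpq]; simp
      rw [PySem.Str.len_eq]; omega
    · rw [PySem.List.mem_pyRange_one]; omega
    · apply String.toList_inj.mp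
      rw [PySem.Str.toList_slice,
        show (p.length : Int) + (s.toList.length : Int) = ((p.length + s.toList.length : Nat) : Int) by push_cast; ring]
      unfold PySem.Chars.slice
      rw [PySem.List.slice_natCast, ← hpq]
      rw [show p ++ s.toList ++ q = p ++ (s.toList ++ q) by simp, List.drop_left]
      simp

-- ===== VERDICT (by name: the statement is the Claim_ definition above) =====
theorem fallback_contains_py_spec : Claim_equal_fallback_contains_py := by
  intro synonyms text _
  unfold Spec_fallback_contains_py fallback_contains_py fallback_contains_py_alt
  rw [PySem.List.foldl_append_if
    (fun p => pvAInner text (PySem.Str.replace text " " "") (p.1 :: p.2)) Prod.fst]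
  simp only [List.nil_append]
  set compact := PySem.Str.replace text " " "" with hcompact
  set g : (String × List String) → (String × List String) := fun p =>
    (p.1, ((p.1 :: p.2).filter (fun t => t != "")).map pvStripLower) with hg
  set maxLen := PySem.List.maxD (((synonyms.map g).flatMap Prod.snd).map PySem.Str.len)
    (fun x => x) 0 with hmax
  rw [List.filter_map, List.map_map]
  have hfst : Prod.fst ∘ g = Prod.fst := by funext p; rfl
  rw [hfst]
  congr 1
  apply List.filter_congr
  intro p hp
  rw [pv_inner_eq_any]
  simp only [Function.comp, hg, List.any_map, List.any_filter]
  apply PySem.List.any_congr_mem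
  intro t ht
  by_cases hte : t = ""
  · simp [hte]
  · have htne : (t != "") = true := by simp [hte]
    rw [htne, Bool.true_and, Bool.true_and]
    -- the normalized term's length is bounded by maxLen
    have hmemflat : pvStripLower t ∈ (synonyms.map g).flatMap Prod.snd := by
      refine List.mem_flatMap.mpr ⟨g p, List.mem_map_of_mem hp, ?_⟩
      exact List.mem_map_of_mem (List.mem_filter.mpr ⟨ht, htne⟩)
    have hbound := pv_maxD_bound (((synonyms.map g).flatMap Prod.snd).map PySem.Str.len)
      (by
        intro x hx
        obtain ⟨u, _, rfl⟩ := List.mem_map.mp hx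
        rw [PySem.Str.len_eq]; positivity)
    have hle : PySem.Str.len (pvStripLower t) ≤ maxLen :=
      hbound.2 _ (List.mem_map_of_mem hmemflat)
    rw [PySem.Str.len_eq] at hle
    have : PySem.Set.contains (PySem.Set.ofList (pvSubsList compact maxLen)) (pvStripLower t)
        = PySem.Str.isIn (pvStripLower t) compact := by
      simp only [PySem.Set.contains_eq_listContains, List.contains_eq_mem, PySem.Set.mem_ofList]
      have hiff := pv_mem_subs compact (pvStripLower t) maxLen (by positivity) hle
      by_cases hmem : pvStripLower t ∈ pvSubsList compact maxLen
      · rw [decide_eq_true hmem, hiff.mp hmem]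
      · rw [decide_eq_false hmem]
        cases h2 : PySem.Str.isIn (pvStripLower t) compact with
        | false => rfl
        | true => exact absurd (hiff.mpr h2) hmem
    exact this.symm
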